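-- pv_equiv track=rewrite | github.com/Pederrr/AoC2022 | 07/solution.py | read_dir
-- ===== SOURCE A (Python) =====
-- from typing import Tuple, List
--
-- Size = int
--
-- Index = int
--
-- def is_command(line: str) -> bool:
--     return line[0] == "$"
--
-- def is_cd(line: str) -> bool:
--     return is_command and line[2:4] == "cd"
--
-- def is_cd_return(line: str) -> bool:
--     return is_cd(line) and line[5:7] == ".."
--
-- def is_ls(line: str) -> bool:
--     return is_command(line) and line[2:4] == "ls"
--
-- def parse_size(line: str) -> Size:
--     size = line.split(" ")[0]
--     if size == "dir":
--         return 0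
--
--     return int(size)
--
-- def read_ls(lines: List[str], index: Index) -> Tuple[Size, Index]:
--     size = 0
--     while index < len(lines) and not is_command(lines[index]):
--         size += parse_size(lines[index])
--         index += 1
--
--     return size, index
--
-- def read_dir(lines: List[str], index: Index, dirs_sizes: List[int]) -> Tuple[Size, Index]:
--     total_size = 0
--     while index < len(lines):
--         if is_cd_return(lines[index]):
--             dirs_sizes.append(total_size)
--             return total_size, index + 1
--         if is_cd(lines[index]):
--             size, new_index = read_dir(lines, index + 1, dirs_sizes)
--             index = new_index
--             total_size += size
--         elif is_ls(lines[index]):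
--             size, new_index = read_ls(lines, index + 1)
--             index = new_index
--             total_size += size
--
--     dirs_sizes.append(total_size)
--     return total_size, index
-- ===== SOURCE B (Python) =====
-- from typing import Tuple, List
--
-- Size = int
-- Index = int
--
-- def is_command(line: str) -> bool:
--     return line[0] == "$"
--
-- def is_cd(line: str) -> bool:
--     return is_command and line[2:4] == "cd"
--
-- def is_cd_return(line: str) -> bool:
--     return is_cd(line) and line[5:7] == ".."
--
-- def is_ls(line: str) -> bool:
--     return is_command(line) and line[2:4] == "ls"
--
-- def parse_size(line: str) -> Size:
--     size = line.split(" ")[0]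
--     if size == "dir":
--         return 0
--     return int(size)
--
-- def read_ls(lines: List[str], index: Index) -> Tuple[Size, Index]:
--     size = 0
--     while index < len(lines) and not is_command(lines[index]):
--         size += parse_size(lines[index])
--         index += 1
--     return size, index
--
-- def read_dir(lines: List[str], index: Index, dirs_sizes: List[int]) -> Tuple[Size, Index]:
--     # Iterative version: one pass with an explicit stack of running directory totals
--     # instead of recursion.
--     stack = [0]
--     while index < len(lines):
--         line = lines[index]
--         if is_cd_return(line):
--             top = stack.pop()
--             dirs_sizes.append(top)
--             index += 1
--             if not stack:
--                 return top, index
--             stack[-1] += top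
--         elif is_cd(line):
--             stack.append(0)
--             index += 1
--         elif is_ls(line):
--             size, index = read_ls(lines, index + 1)
--             stack[-1] += size
--         else:
--             index += 1
--     # end of input: close every still-open directory, innermost first
--     while len(stack) > 1:
--         top = stack.pop()
--         dirs_sizes.append(top)
--         stack[-1] += top
--     dirs_sizes.append(stack[0])
--     return stack[0], index
-- ===== Notes on version B (the rewrite author's own statement) =====
-- stated objective: alternative
-- what changed: Replaces A's recursive descent (one read_dir call per directory) by a single iterative loop over the lines with an explicit stack of running directory totals, popped on 'cd ..' and flushed innermost-first at end of input.
-- outside the precondition, e.g. on read_dir(['$ cd ..'], -1, []): A returns (0, 0), B returns (0, 0); on read_dir(['$ cd ..', '???'], 0, []): A returns (0, 1), B returns (0, 1)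
import Mathlib
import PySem

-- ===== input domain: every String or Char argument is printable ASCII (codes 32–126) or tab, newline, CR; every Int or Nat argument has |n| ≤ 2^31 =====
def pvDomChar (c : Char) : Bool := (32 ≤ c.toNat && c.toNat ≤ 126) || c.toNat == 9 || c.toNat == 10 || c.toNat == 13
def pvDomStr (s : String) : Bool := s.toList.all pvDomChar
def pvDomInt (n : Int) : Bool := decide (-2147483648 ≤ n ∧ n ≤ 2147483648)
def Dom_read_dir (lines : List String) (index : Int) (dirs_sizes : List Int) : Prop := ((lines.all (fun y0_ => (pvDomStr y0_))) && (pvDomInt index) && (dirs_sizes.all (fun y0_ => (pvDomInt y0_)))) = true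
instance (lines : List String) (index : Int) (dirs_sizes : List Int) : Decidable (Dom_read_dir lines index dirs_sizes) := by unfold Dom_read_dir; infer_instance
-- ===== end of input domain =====

-- B rewrites A's recursion as one iterative pass with an explicit stack of running directory
-- totals (objective: alternative decomposition, same cost). Both A and B append to dirs_sizes
-- in place; the equivalence proved here is about the RETURN value only (on Pre_ inputs B
-- performs the same appends in the same order, but that is not part of the claim).

-- ===== PORT A =====
-- Shared helpers, working on List Char (strings are bridged once via String.toList).
-- Python is_command: line[0] == "$" (raises IndexError on ""; empty lines are excluded by Pre_).
def isCommand (cs : List Char) : Bool := PySem.List.pyGet? cs 0 == some '$'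
-- Python is_cd has the quirk `is_command and …`: the function OBJECT is truthy, so only the slice matters.
def isCd (cs : List Char) : Bool := PySem.List.slice cs (some 2) (some 4) == ['c', 'd']
def isCdReturn (cs : List Char) : Bool := isCd cs && (PySem.List.slice cs (some 5) (some 7) == ['.', '.'])
def isLs (cs : List Char) : Bool := isCommand cs && (PySem.List.slice cs (some 2) (some 4) == ['l', 's'])
-- Python parse_size: line.split(" ")[0]; int() raising ValueError is excluded by Pre_ (getD 0 unreachable there).
def parseSize (cs : List Char) : Int :=
  let size := (PySem.Chars.splitOn cs [' ']).headD []
  if size = ['d', 'i', 'r'] then 0 else (PySem.Int.ofChars? size).getD 0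

-- the line at Python index i (lines[i]); getD [] is unreachable for the 0 ≤ i < len accesses Pre_ admits
def lineAt (ls : List (List Char)) (i : Int) : List Char := (PySem.List.pyGet? ls i).getD []

-- Python read_ls: while index < len(lines) and not is_command(lines[index]): …
-- The loop advances index by 1 each iteration, so fuel = (len - index).toNat is EXACT bookkeeping:
-- it reaches 0 only when index ≥ len, where the loop condition is false anyway.
def readLsGo (ls : List (List Char)) : Nat → Int → Int → Int × Int
  | 0, index, size => (size, index)
  | fuel + 1, index, size =>
    if index < (ls.length : Int) ∧ isCommand (lineAt ls index) = false then
      readLsGo ls fuel (index + 1) (size + parseSize (lineAt ls index))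
    else (size, index)

def readLs (ls : List (List Char)) (index : Int) (size : Int) : Int × Int :=
  readLsGo ls ((ls.length : Int) - index).toNat index size

-- A's while-loop/recursion, transliterated with fuel: one unit per loop-head evaluation.
-- Fuel 0 is unreachable under Pre_ (shown by the proofs below); the final `else` branch
-- is Python A's infinite loop (no branch fires, index unchanged), also excluded by Pre_.
def goA (ls : List (List Char)) (fuel : Nat) (index : Int) (total : Int) : Int × Int :=
  match fuel with
  | 0 => (total, index)
  | fuel + 1 =>
    if index < (ls.length : Int) then
      let line := lineAt ls index
      if isCdReturn line then (total, index + 1)        -- dirs_sizes.append(total); return total, index+1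
      else if isCd line then
        let p := goA ls fuel (index + 1) 0              -- recursive read_dir(lines, index+1, dirs_sizes)
        goA ls fuel p.2 (total + p.1)
      else if isLs line then
        let p := readLs ls (index + 1) 0
        goA ls fuel p.2 (total + p.1)
      else goA ls fuel index total                      -- Python: loop body falls through, index unchanged
    else (total, index)                                  -- dirs_sizes.append(total); return total, index

def read_dir (lines : List String) (index : Int) (dirs_sizes : List Int) : Int × Int :=
  goA (lines.map String.toList) (lines.length + 1) index 0

-- ===== PORT B =====
-- Source B's closing flush: while len(stack) > 1: pop, fold into the new top; return stack[0]
def flushAcc (top : Int) : List Int → Int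
  | [] => top
  | next :: rest => flushAcc (next + top) rest

def flushB : List Int → Int
  | [] => 0                     -- unreachable: the stack is never empty
  | top :: rest => flushAcc top rest

-- Source B's single loop; the stack's head is Python's stack[-1]. Every iteration advances index
-- by at least 1, so fuel = (len - index).toNat is exact bookkeeping again: at fuel 0 the
-- loop condition index < len is false and B returns (flush, index), which is what fuel 0 does.
def goBGo (ls : List (List Char)) : Nat → Int → List Int → Int × Int
  | 0, index, stack => (flushB stack, index)
  | fuel + 1, index, stack =>
    if index < (ls.length : Int) then
      let line := lineAt ls index
      if isCdReturn line then
        match stack with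
        | [] => (0, index + 1)                          -- Python stack.pop() on []; unreachable, stack stays nonempty
        | [top] => (top, index + 1)                     -- pop; stack empty: return top, index
        | top :: next :: rest => goBGo ls fuel (index + 1) ((next + top) :: rest)   -- pop; stack[-1] += top
      else if isCd line then goBGo ls fuel (index + 1) (0 :: stack)
      else if isLs line then
        let p := readLs ls (index + 1) 0
        goBGo ls fuel p.2 ((stack.headD 0 + p.1) :: stack.tail)  -- stack[-1] += size
      else goBGo ls fuel (index + 1) stack              -- Source B skips an unrecognized line
    else (flushB stack, index)

def goB (ls : List (List Char)) (index : Int) (stack : List Int) : Int × Int :=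
  goBGo ls ((ls.length : Int) - index).toNat index stack

def read_dir_alt (lines : List String) (index : Int) (dirs_sizes : List Int) : Int × Int :=
  goB (lines.map String.toList) index [0]

-- ===== PRECONDITION & SPEC =====
-- position j is a valid loop-head: past the end, or a line the loop recognizes (cd or ls)
def Heads (ls : List (List Char)) (j : Int) : Prop :=
  j < (ls.length : Int) → (isCd (lineAt ls j) || isLs (lineAt ls j)) = true

-- a line A can consume without raising: nonempty, a '$'-line is cd or ls, a non-'$' line parses in read_ls
def LineOK (cs : List Char) : Bool :=
  !cs.isEmpty &&
    (if isCommand cs then isCd cs || isLs cs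
     else (PySem.Chars.splitOn cs [' ']).headD [] = ['d', 'i', 'r'] ||
          (PySem.Int.ofChars? ((PySem.Chars.splitOn cs [' ']).headD [])).isSome)

-- Pre_ excludes the inputs on which A raises (IndexError/ValueError) or loops forever, plus two
-- kinds of corner input on which A still returns: negative start indices (Python negative-index
-- wraparound) and inputs whose ill-formed lines sit at positions ≥ index that A happens never to
-- reach (the closed form constrains every line from the start position on).
def Pre_read_dir (lines : List String) (index : Int) (dirs_sizes : List Int) : Prop :=
  0 ≤ index ∧
  (∀ i : Nat, i < (lines.map String.toList).length → index ≤ (i : Int) →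
      LineOK (lineAt (lines.map String.toList) (i : Int)) = true) ∧
  Heads (lines.map String.toList) index ∧
  (∀ i : Nat, i < (lines.map String.toList).length → index ≤ (i : Int) →
      isCd (lineAt (lines.map String.toList) (i : Int)) = true →
      Heads (lines.map String.toList) ((i : Int) + 1))

instance (lines : List String) (index : Int) (dirs_sizes : List Int) :
    Decidable (Pre_read_dir lines index dirs_sizes) := by
  unfold Pre_read_dir Heads; infer_instance

def pvWitness_read_dir : List String × Int × List Int :=
  (["$ cd a", "$ ls", "100 f", "dir b", "$ cd ..", "$ ls", "5 g"], 0, [])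

def Spec_read_dir (lines : List String) (index : Int) (dirs_sizes : List Int) (out : Int × Int) : Prop := out = read_dir_alt lines index dirs_sizes
instance (lines : List String) (index : Int) (dirs_sizes : List Int) (out : Int × Int) : Decidable (Spec_read_dir lines index dirs_sizes out) := by unfold Spec_read_dir; infer_instance

-- ===== CLAIM (what is proved, stated in full; the proofs are below) =====
def Claim_equal_read_dir : Prop := ∀ (lines : List String) (index : Int) (dirs_sizes : List Int), Dom_read_dir lines index dirs_sizes → Pre_read_dir lines index dirs_sizes → Spec_read_dir lines index dirs_sizes (read_dir lines index dirs_sizes)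

-- ===== LEMMAS AND PROOFS =====

-- B's pending-stack continuation: what goB still does after A's current call returns p
def postB (ls : List (List Char)) (p : Int × Int) : List Int → Int × Int
  | [] => p
  | u :: s => goB ls p.2 ((u + p.1) :: s)

-- read_ls only moves the index forward
theorem readLsGo_le (ls : List (List Char)) :
    ∀ (fuel : Nat) (index size : Int), index ≤ (readLsGo ls fuel index size).2 := by
  intro fuel
  induction fuel with
  | zero => intro index size; simp [readLsGo]
  | succ f IH =>
    intro index size
    by_cases hc : index < (ls.length : Int) ∧ isCommand (lineAt ls index) = false
    · have := IH (index + 1) (size + parseSize (lineAt ls index))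
      simp only [readLsGo, if_pos hc]
      omega
    · simp [readLsGo, hc]

theorem readLs_le (ls : List (List Char)) (index size : Int) : index ≤ (readLs ls index size).2 :=
  readLsGo_le ls _ index size

-- read_ls stops past the end or at a command line, which LineOK forces to be cd or ls
theorem readLsGo_stop (ls : List (List Char)) (a : Int)
    (HL : ∀ i : Nat, i < ls.length → a ≤ (i : Int) → LineOK (lineAt ls (i : Int)) = true) :
    ∀ (fuel : Nat) (index size : Int), ((ls.length : Int) - index).toNat ≤ fuel →
      a ≤ index → 0 ≤ index → Heads ls (readLsGo ls fuel index size).2 := by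
  intro fuel
  induction fuel with
  | zero =>
    intro index size hf ha h0 hlt
    exact absurd hlt (by simp only [readLsGo]; omega)
  | succ f IH =>
    intro index size hf ha h0
    by_cases hc : index < (ls.length : Int) ∧ isCommand (lineAt ls index) = false
    · rw [show readLsGo ls (f + 1) index size = readLsGo ls f (index + 1) (size + parseSize (lineAt ls index)) from by simp [readLsGo, hc]]
      exact IH (index + 1) _ (by omega) (by omega) (by omega)
    · rw [show readLsGo ls (f + 1) index size = (size, index) from by simp [readLsGo, hc]]
      intro hlt
      have h0' : (index.toNat : Int) = index := Int.toNat_of_nonneg h0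
      have hcmd : isCommand (lineAt ls index) = true := by
        by_contra hcm
        rw [Bool.not_eq_true] at hcm
        exact hc ⟨hlt, hcm⟩
      have hok := HL index.toNat (by omega) (by omega)
      rw [h0'] at hok
      simp only [LineOK, hcmd, if_true, Bool.and_eq_true] at hok
      exact hok.2

theorem readLs_heads (ls : List (List Char)) (a : Int)
    (HL : ∀ i : Nat, i < ls.length → a ≤ (i : Int) → LineOK (lineAt ls (i : Int)) = true)
    (index size : Int) (ha : a ≤ index) (h0 : 0 ≤ index) :
    Heads ls (readLs ls index size).2 :=
  readLsGo_stop ls a HL _ index size (le_refl _) ha h0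

-- one extra unit of fuel changes nothing once fuel covers (len - index)
theorem goBGo_succ (ls : List (List Char)) :
    ∀ (f : Nat) (index : Int) (stack : List Int), ((ls.length : Int) - index).toNat ≤ f →
      goBGo ls (f + 1) index stack = goBGo ls f index stack := by
  intro f
  induction f with
  | zero =>
    intro index stack hf
    have hlt : ¬ index < (ls.length : Int) := by omega
    simp [goBGo, hlt]
  | succ f IH =>
    intro index stack hf
    by_cases hlt : index < (ls.length : Int)
    · by_cases hret : isCdReturn (lineAt ls index) = true
      · cases stack with
        | nil => simp [goBGo, hlt, hret]
        | cons top rest =>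
          cases rest with
          | nil => simp [goBGo, hlt, hret]
          | cons next rest' =>
            simp only [goBGo, if_pos hlt, hret, if_true]
            exact IH (index + 1) _ (by omega)
      · rw [Bool.not_eq_true] at hret
        by_cases hcd : isCd (lineAt ls index) = true
        · simp only [goBGo, if_pos hlt, hret, hcd, Bool.false_eq_true, if_false, if_true]
          exact IH (index + 1) _ (by omega)
        · rw [Bool.not_eq_true] at hcd
          by_cases hls : isLs (lineAt ls index) = true
          · simp only [goBGo, if_pos hlt, hret, hcd, hls, Bool.false_eq_true, if_false, if_true]
            have hp := readLs_le ls (index + 1) 0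
            exact IH (readLs ls (index + 1) 0).2 _ (by omega)
          · rw [Bool.not_eq_true] at hls
            simp only [goBGo, if_pos hlt, hret, hcd, hls, Bool.false_eq_true, if_false]
            exact IH (index + 1) _ (by omega)
    · simp [goBGo, hlt]

-- hence any sufficient fuel computes goB
theorem goBGo_eq (ls : List (List Char)) :
    ∀ (f : Nat) (index : Int) (stack : List Int), ((ls.length : Int) - index).toNat ≤ f →
      goBGo ls f index stack = goB ls index stack := by
  intro f
  induction f with
  | zero =>
    intro index stack hf
    have h0 : ((ls.length : Int) - index).toNat = 0 := by omega
    rw [goB, h0]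
  | succ f IH =>
    intro index stack hf
    by_cases h : ((ls.length : Int) - index).toNat ≤ f
    · rw [goBGo_succ ls f index stack h]
      exact IH index stack h
    · have h1 : ((ls.length : Int) - index).toNat = f + 1 := by omega
      rw [goB, h1]

-- goB satisfies Source B's loop equation
theorem goB_unfold (ls : List (List Char)) (index : Int) (stack : List Int) :
    goB ls index stack =
      if index < (ls.length : Int) then
        (if isCdReturn (lineAt ls index) then
          match stack with
          | [] => (0, index + 1)
          | [top] => (top, index + 1)
          | top :: next :: rest => goB ls (index + 1) ((next + top) :: rest)
        else if isCd (lineAt ls index) then goB ls (index + 1) (0 :: stack)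
        else if isLs (lineAt ls index) then
          goB ls (readLs ls (index + 1) 0).2 ((stack.headD 0 + (readLs ls (index + 1) 0).1) :: stack.tail)
        else goB ls (index + 1) stack)
      else (flushB stack, index) := by
  by_cases hlt : index < (ls.length : Int)
  · have hm : ∃ m : Nat, ((ls.length : Int) - index).toNat = m + 1 :=
      ⟨(((ls.length : Int) - index).toNat) - 1, by omega⟩
    obtain ⟨m, hm⟩ := hm
    rw [if_pos hlt, goB, hm]
    by_cases hret : isCdReturn (lineAt ls index) = true
    · cases stack with
      | nil => simp [goBGo, hlt, hret]
      | cons top rest =>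
        cases rest with
        | nil => simp [goBGo, hlt, hret]
        | cons next rest' =>
          simp only [goBGo, if_pos hlt, hret, if_true]
          exact goBGo_eq ls m (index + 1) _ (by omega)
    · rw [Bool.not_eq_true] at hret
      by_cases hcd : isCd (lineAt ls index) = true
      · simp only [goBGo, if_pos hlt, hret, hcd, Bool.false_eq_true, if_false, if_true]
        exact goBGo_eq ls m (index + 1) _ (by omega)
      · rw [Bool.not_eq_true] at hcd
        by_cases hls : isLs (lineAt ls index) = true
        · simp only [goBGo, if_pos hlt, hret, hcd, hls, Bool.false_eq_true, if_false, if_true]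
          have hp := readLs_le ls (index + 1) 0
          exact goBGo_eq ls m _ _ (by omega)
        · rw [Bool.not_eq_true] at hls
          simp only [goBGo, if_pos hlt, hret, hcd, hls, Bool.false_eq_true, if_false]
          exact goBGo_eq ls m (index + 1) _ (by omega)
  · rw [if_neg hlt, goB]
    cases hn : ((ls.length : Int) - index).toNat with
    | zero => simp [goBGo]
    | succ m => simp [goBGo, hlt]

-- Main simulation: A's recursion at (index, total) with B's pending stack s
theorem mainL (ls : List (List Char)) (a : Int)
    (HL : ∀ i : Nat, i < ls.length → a ≤ (i : Int) → LineOK (lineAt ls (i : Int)) = true)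
    (HP : ∀ i : Nat, i < ls.length → a ≤ (i : Int) → isCd (lineAt ls (i : Int)) = true →
        Heads ls ((i : Int) + 1)) :
    ∀ (fuel : Nat) (index t : Int), a ≤ index → 0 ≤ index → Heads ls index →
      ((ls.length : Int) - index).toNat + 1 ≤ fuel →
      (index ≤ (goA ls fuel index t).2 ∧ Heads ls (goA ls fuel index t).2) ∧
      (∀ s : List Int, goB ls index (t :: s) = postB ls (goA ls fuel index t) s) := by
  intro fuel
  induction fuel with
  | zero => intro index t _ _ _ hf; exact absurd hf (by omega)
  | succ f IH =>
    intro index t ha h0 hh hf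
    have h0' : (index.toNat : Int) = index := Int.toNat_of_nonneg h0
    by_cases hlt : index < (ls.length : Int)
    · have hHok : (isCd (lineAt ls index) || isLs (lineAt ls index)) = true := hh hlt
      by_cases hret : isCdReturn (lineAt ls index) = true
      · -- cd .. : A returns (total, index + 1); B pops
        have hcd : isCd (lineAt ls index) = true := by
          simp only [isCdReturn, Bool.and_eq_true] at hret; exact hret.1
        have hH1 : Heads ls (index + 1) := by
          have := HP index.toNat (by omega) (by omega) (by rw [h0']; exact hcd)
          rwa [h0'] at this
        have hA : goA ls (f + 1) index t = (t, index + 1) := by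
          simp [goA, hlt, hret]
        refine ⟨by rw [hA]; exact ⟨by omega, hH1⟩, ?_⟩
        intro s
        rw [hA]
        cases s with
        | nil => rw [goB_unfold]; simp [hlt, hret, postB]
        | cons u s' => rw [goB_unfold]; simp [hlt, hret, postB]
      · rw [Bool.not_eq_true] at hret
        by_cases hcd : isCd (lineAt ls index) = true
        · -- cd <dir> : A recurses, then continues with the returned index
          have hH1 : Heads ls (index + 1) := by
            have := HP index.toNat (by omega) (by omega) (by rw [h0']; exact hcd)
            rwa [h0'] at this
          obtain ⟨⟨hge1, hH2⟩, heq1⟩ := IH (index + 1) 0 (by omega) (by omega) hH1 (by omega)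
          obtain ⟨⟨hge2, hH3⟩, heq2⟩ :=
            IH (goA ls f (index + 1) 0).2 (t + (goA ls f (index + 1) 0).1)
              (by omega) (by omega) hH2 (by omega)
          have hA : goA ls (f + 1) index t
              = goA ls f (goA ls f (index + 1) 0).2 (t + (goA ls f (index + 1) 0).1) := by
            simp [goA, hlt, hret, hcd]
          refine ⟨by rw [hA]; exact ⟨by omega, hH3⟩, ?_⟩
          intro s
          rw [hA]
          calc goB ls index (t :: s)
              = goB ls (index + 1) (0 :: t :: s) := by
                conv_lhs => rw [goB_unfold]
                simp [hlt, hret, hcd]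
            _ = postB ls (goA ls f (index + 1) 0) (t :: s) := heq1 (t :: s)
            _ = goB ls (goA ls f (index + 1) 0).2 ((t + (goA ls f (index + 1) 0).1) :: s) := by
                simp [postB]
            _ = postB ls (goA ls f (goA ls f (index + 1) 0).2 (t + (goA ls f (index + 1) 0).1)) s :=
                heq2 s
        · -- ls : A reads the listing, continues where read_ls stopped
          rw [Bool.not_eq_true] at hcd
          have hls : isLs (lineAt ls index) = true := by
            rcases Bool.or_eq_true_iff.mp hHok with hc | hc
            · exact absurd hc (by simp [hcd])
            · exact hc
          have hgeq : index + 1 ≤ (readLs ls (index + 1) 0).2 := readLs_le ls (index + 1) 0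
          have hHq : Heads ls (readLs ls (index + 1) 0).2 :=
            readLs_heads ls a HL (index + 1) 0 (by omega) (by omega)
          obtain ⟨⟨hge2, hH3⟩, heq2⟩ :=
            IH (readLs ls (index + 1) 0).2 (t + (readLs ls (index + 1) 0).1)
              (by omega) (by omega) hHq (by omega)
          have hA : goA ls (f + 1) index t
              = goA ls f (readLs ls (index + 1) 0).2 (t + (readLs ls (index + 1) 0).1) := by
            simp [goA, hlt, hret, hcd, hls]
          refine ⟨by rw [hA]; exact ⟨by omega, hH3⟩, ?_⟩
          intro s
          rw [hA]
          calc goB ls index (t :: s)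
              = goB ls (readLs ls (index + 1) 0).2 ((t + (readLs ls (index + 1) 0).1) :: s) := by
                conv_lhs => rw [goB_unfold]
                simp [hlt, hret, hcd, hls]
            _ = postB ls (goA ls f (readLs ls (index + 1) 0).2 (t + (readLs ls (index + 1) 0).1)) s :=
                heq2 s
    · -- past the end: A returns (total, index); B flushes the stack
      have hA : goA ls (f + 1) index t = (t, index) := by simp [goA, hlt]
      refine ⟨by rw [hA]; exact ⟨le_refl _, hh⟩, ?_⟩
      intro s
      rw [hA]
      cases s with
      | nil => rw [goB_unfold]; simp [hlt, postB, flushB, flushAcc]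
      | cons u s' =>
        show goB ls index (t :: u :: s') = goB ls index ((u + t) :: s')
        rw [goB_unfold]
        conv_rhs => rw [goB_unfold]
        simp [hlt, flushB, flushAcc]

-- ===== VERDICT (by name: the statement is the Claim_ definition above) =====
theorem read_dir_spec : Claim_equal_read_dir := by
  intro lines index dirs_sizes _ hP
  obtain ⟨h0, HL, hh, HP⟩ := hP
  have hlen : (lines.map String.toList).length = lines.length := by simp
  have hmain := (mainL (lines.map String.toList) index HL HP (lines.length + 1) index 0
    (le_refl index) h0 hh (by omega)).2 []
  unfold Spec_read_dir read_dir read_dir_alt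
  rw [hmain]
  rfl
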